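-- pv_equiv track=rewrite | github.com/vesarekola9-ctrl/tamacore-bot | gui_app.py | detect_last_failed_step
-- ===== SOURCE A (Python) =====
-- def detect_last_failed_step(log_text: str) -> str:
--     # run_pipeline logs:
--     # [ts] > Running: X.py
--     # [ts] [ok] X.py
--     # [ts] [fail] ...
--     lines = (log_text or "").splitlines()
--     last_running = ""
--     for line in lines:
--         if "> Running:" in line:
--             last_running = line.split("> Running:", 1)[1].strip()
--         if "[fail]" in line:
--             return last_running or "Unknown step"
--     return ""
-- ===== SOURCE B (Python) =====
-- def detect_last_failed_step(log_text: str) -> str: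
--     # Locate the first failing line, then scan backwards for the nearest
--     # "> Running:" marker (the fail line itself included).
--     lines = (log_text or "").splitlines()
--     fail_idx = next((i for i, l in enumerate(lines) if "[fail]" in l), None)
--     if fail_idx is None:
--         return ""
--     for line in reversed(lines[:fail_idx + 1]):
--         if "> Running:" in line:
--             return line.split("> Running:", 1)[1].strip() or "Unknown step"
--     return "Unknown step"
-- ===== Notes on version B (the rewrite author's own statement) =====
-- stated objective: alternative
-- what changed: Replaces A's forward single pass with a running-step accumulator by a two-phase locate-then-backtrack traversal: locate the first failing line, then scan backwards from it for the nearest running-step marker.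
import Mathlib
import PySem

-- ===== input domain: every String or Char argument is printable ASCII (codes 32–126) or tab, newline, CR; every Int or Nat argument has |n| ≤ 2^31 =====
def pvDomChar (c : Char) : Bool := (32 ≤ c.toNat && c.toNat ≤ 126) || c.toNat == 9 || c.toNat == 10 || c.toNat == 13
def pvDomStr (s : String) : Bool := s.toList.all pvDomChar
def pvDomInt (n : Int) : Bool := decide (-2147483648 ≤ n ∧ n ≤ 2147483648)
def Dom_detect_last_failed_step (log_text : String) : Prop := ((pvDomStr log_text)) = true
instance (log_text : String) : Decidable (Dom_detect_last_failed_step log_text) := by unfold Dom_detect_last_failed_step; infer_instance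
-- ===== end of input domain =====

-- B replaces A's forward accumulator pass by a locate-first-fail-then-backtrack traversal (alternative decomposition, same cost).

-- ===== PORT A =====
-- the for-loop with early return, as structural recursion over the lines with the accumulator last_running
def detect_last_failed_step.go : List String → String → String
  | [], _ => ""
  | line :: rest, last_running =>
    let last_running :=
      if PySem.Str.isIn "> Running:" line then
        -- split("> Running:", 1)[1]: the guard guarantees the separator occurs, so index 1 exists and getD is exact
        PySem.Str.strip (((PySem.Str.splitMax? line "> Running:" 1).getD []).getD 1 "")
      else last_running
    if PySem.Str.isIn "[fail]" line then
      (if last_running == "" then "Unknown step" else last_running)   -- last_running or "Unknown step"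
    else detect_last_failed_step.go rest last_running

def detect_last_failed_step (log_text : String) : String :=
  -- (log_text or ""): falsy string = empty string
  let lines := PySem.Str.splitlines (if log_text == "" then "" else log_text)
  detect_last_failed_step.go lines ""

-- ===== PORT B =====
def detect_last_failed_step_alt (log_text : String) : String :=
  let lines := PySem.Str.splitlines (if log_text == "" then "" else log_text)
  match lines.findIdx? (fun l => PySem.Str.isIn "[fail]" l) with
  | none => ""
  | some fail_idx =>
    match (lines.take (fail_idx + 1)).reverse.find? (fun l => PySem.Str.isIn "> Running:" l) with
    | none => "Unknown step"
    | some line =>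
      -- split("> Running:", 1)[1]: the find? guard guarantees the separator occurs, so index 1 exists and getD is exact
      let step := PySem.Str.strip (((PySem.Str.splitMax? line "> Running:" 1).getD []).getD 1 "")
      if step == "" then "Unknown step" else step

-- ===== PRECONDITION & SPEC =====
def Spec_detect_last_failed_step (log_text : String) (out : String) : Prop := out = detect_last_failed_step_alt log_text
instance (log_text : String) (out : String) : Decidable (Spec_detect_last_failed_step log_text out) := by unfold Spec_detect_last_failed_step; infer_instance

-- ===== CLAIM (what is proved, stated in full; the proofs are below) =====
def Claim_equal_detect_last_failed_step : Prop := ∀ (log_text : String), Dom_detect_last_failed_step log_text → Spec_detect_last_failed_step log_text (detect_last_failed_step log_text)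

-- ===== LEMMAS AND PROOFS =====

-- the text extracted from a running line (shared notation for the proofs only)
def pvStep (line : String) : String :=
  PySem.Str.strip (((PySem.Str.splitMax? line "> Running:" 1).getD []).getD 1 "")

-- A's loop result, characterised by B's locate-then-backtrack shape, generalised over the accumulator
theorem go_spec (lines : List String) (last : String) :
    detect_last_failed_step.go lines last =
      match lines.findIdx? (fun l => PySem.Str.isIn "[fail]" l) with
      | none => ""
      | some fail_idx =>
        match (lines.take (fail_idx + 1)).reverse.find? (fun l => PySem.Str.isIn "> Running:" l) with
        | none => if last == "" then "Unknown step" else last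
        | some line => if pvStep line == "" then "Unknown step" else pvStep line := by
  induction lines generalizing last with
  | nil => simp [detect_last_failed_step.go]
  | cons line rest ih =>
    by_cases hf : PySem.Chars.isIn ['[','f','a','i','l',']'] line.toList = true
    · by_cases hr : PySem.Chars.isIn ['>',' ','R','u','n','n','i','n','g',':'] line.toList = true
      · simp [detect_last_failed_step.go, List.findIdx?_cons, hf, hr, pvStep]
      · simp [detect_last_failed_step.go, List.findIdx?_cons, hf, hr]
    · simp only [detect_last_failed_step.go]
      simp [List.findIdx?_cons, hf, ih, pvStep]
      cases h : List.findIdx? (fun l => PySem.Chars.isIn ['[','f','a','i','l',']'] l.toList) rest with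
      | none => simp
      | some j =>
        simp
        cases k : (rest.take (j + 1)).reverse.find?
            (fun l => PySem.Chars.isIn ['>',' ','R','u','n','n','i','n','g',':'] l.toList) with
        | none =>
          by_cases hr : PySem.Chars.isIn ['>',' ','R','u','n','n','i','n','g',':'] line.toList = true <;>
            simp [hr]
        | some x => simp

-- ===== VERDICT (by name: the statement is the Claim_ definition above) =====
theorem detect_last_failed_step_spec : Claim_equal_detect_last_failed_step := by
  intro log_text _
  unfold Spec_detect_last_failed_step detect_last_failed_step detect_last_failed_step_alt
  rw [go_spec]
  simp [pvStep]
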